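-- pv_equiv track=rewrite | github.com/maxxx580/tripadvisor-take-home | main.py | count_mathcing_tuples
-- ===== SOURCE A (Python) =====
-- def generate_synonmys_tuples_recusively(res, path, words, index):
--     """ this function generate all possible synonmys tuple using depth first search approach.
--
--     Arguments:
--         res {list} -- a list of tuples generated so far.
--         path {tuple} -- a tuple being built in progress.
--         words {list} -- a list of synonmys group used to build synonmys tuple
--         index {integer} -- an index pointing at the location to search for synonmys
--     """
--     if index == len(words):
--         res.append(tuple(path))
--         return
--     for w in words[index]:
--         generate_synonmys_tuples_recusively(res, path + [w], words, index+1)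
--     return
--
-- def build_synonyms_tuples(word_tuples, dictionary):
--     """ This function build a list of synonmys tuples
--
--     Arguments:
--         word_tuples {tuple} -- the original word tuple.
--         dictionary {dictionary} -- dictionary with synonyms mapping.
--
--     Returns:
--         [list] -- a list of synonmys tuples.
--     """
--     res, words = [], []
--     for word_tuple in word_tuples:
--         if word_tuple in dictionary:
--             words.append(dictionary[word_tuple] + [word_tuple])
--         else:
--             words.append([word_tuple])
--     generate_synonmys_tuples_recusively(res, [], words, 0)
--     return res
--
-- def count_mathcing_tuples(plagiarized, source, synonyms):
--     """ this function count the matching synonyms tuples between plagiarized and source document.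
--
--     Arguments:
--         plagiarized {list} -- a list of tuples representing the document examined for plagiarism.
--         source {list} -- a list of tuples representing the possible plagiarism source
--         synonyms {dictionary} -- a dictionary containing sysnonmys mappings
--
--     Returns:
--         [integer] -- the number of synonyms tuples of plagiarized found in source
--     """
--     tuple_match_count = 0
--     for tup in plagiarized:
--         synonyms_tuples = build_synonyms_tuples(tup, synonyms)
--         for synonyms_tuple in synonyms_tuples:
--             if synonyms_tuple in source:
--                 tuple_match_count += 1
--     return tuple_match_count
-- ===== SOURCE B (Python) =====
-- def count_mathcing_tuples(plagiarized, source, synonyms):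
--     """Count combinatorially instead of enumerating the Cartesian product:
--     for each distinct source tuple of matching length, multiply per-position
--     occurrence counts of its words among the allowed options."""
--     distinct = list(dict.fromkeys(source))
--     total = 0
--     for tup in plagiarized:
--         options = [synonyms[w] + [w] if w in synonyms else [w] for w in tup]
--         for t in distinct:
--             if len(t) == len(options):
--                 prod = 1
--                 for x, opts in zip(t, options):
--                     prod *= opts.count(x)
--                 total += prod
--     return total
-- ===== Notes on version B (the rewrite author's own statement) =====
-- stated objective: alternative
-- what changed: Instead of enumerating the Cartesian product of synonym options and testing each combination for membership in source, B iterates over the distinct source tuples and, for each one of matching length, multiplies per-position occurrence counts of its words among the option lists, summing these products.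
import Mathlib
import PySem

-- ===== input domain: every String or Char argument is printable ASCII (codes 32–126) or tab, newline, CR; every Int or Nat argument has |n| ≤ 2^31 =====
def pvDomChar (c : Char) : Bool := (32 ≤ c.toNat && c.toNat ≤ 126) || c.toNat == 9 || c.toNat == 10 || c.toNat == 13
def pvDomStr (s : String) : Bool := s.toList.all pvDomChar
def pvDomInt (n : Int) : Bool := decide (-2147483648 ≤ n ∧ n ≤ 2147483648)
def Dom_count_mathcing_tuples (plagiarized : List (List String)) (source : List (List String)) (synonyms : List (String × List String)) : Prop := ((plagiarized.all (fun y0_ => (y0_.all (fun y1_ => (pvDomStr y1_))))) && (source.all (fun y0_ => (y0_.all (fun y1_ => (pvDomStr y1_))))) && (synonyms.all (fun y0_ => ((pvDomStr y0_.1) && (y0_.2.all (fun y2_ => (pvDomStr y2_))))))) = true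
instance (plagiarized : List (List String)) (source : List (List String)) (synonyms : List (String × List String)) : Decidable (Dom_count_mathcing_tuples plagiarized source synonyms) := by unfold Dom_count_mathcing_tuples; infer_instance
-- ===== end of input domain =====

-- B replaces A's enumeration of the Cartesian product of synonym options by a combinatorial
-- count (per-position occurrence products over the distinct source tuples).

-- ===== PORT A =====
-- `index` into `words` is represented by the remaining suffix of `words` (A only ever uses
-- indices 0..len(words), stepping by 1, so the suffix view is exact).
def genSynRec (res : List (List String)) (path : List String) : List (List String) → List (List String)
  | [] => res ++ [path]
  | opts :: rest => opts.foldl (fun r w => genSynRec r (path ++ [w]) rest) res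
termination_by ws => ws.length
decreasing_by simp

def buildSynTuples (wordTuple : List String) (dictionary : PySem.Dict String (List String)) : List (List String) :=
  let words := wordTuple.foldl (fun ws w =>
    match dictionary.get? w with
    | some l => ws ++ [l ++ [w]]
    | none => ws ++ [[w]]) []
  genSynRec [] [] words

def count_mathcing_tuples (plagiarized : List (List String)) (source : List (List String)) (synonyms : List (String × List String)) : Int :=
  plagiarized.foldl (fun c tup =>
    (buildSynTuples tup (PySem.Dict.mk synonyms)).foldl
      (fun c st => if st ∈ source then c + 1 else c) c) 0

-- ===== PORT B =====
-- Source B's list comprehension building the per-position option lists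
def synOptions (synonyms : List (String × List String)) (tup : List String) : List (List String) :=
  tup.map (fun w =>
    match (PySem.Dict.mk synonyms).get? w with
    | some l => l ++ [w]
    | none => [w])

def count_mathcing_tuples_alt (plagiarized : List (List String)) (source : List (List String)) (synonyms : List (String × List String)) : Int :=
  let distinct := PySem.List.dedup source
  plagiarized.foldl (fun total tup =>
    let options := synOptions synonyms tup
    distinct.foldl (fun tot t =>
      if t.length = options.length then
        tot + (t.zip options).foldl (fun p xo => p * (xo.2.count xo.1 : Int)) 1
      else tot) total) 0

-- ===== PRECONDITION & SPEC =====
def Spec_count_mathcing_tuples (plagiarized : List (List String)) (source : List (List String)) (synonyms : List (String × List String)) (out : Int) : Prop := out = count_mathcing_tuples_alt plagiarized source synonyms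
instance (plagiarized : List (List String)) (source : List (List String)) (synonyms : List (String × List String)) (out : Int) : Decidable (Spec_count_mathcing_tuples plagiarized source synonyms out) := by unfold Spec_count_mathcing_tuples; infer_instance

-- ===== CLAIM (what is proved, stated in full; the proofs are below) =====
def Claim_equal_count_mathcing_tuples : Prop := ∀ (plagiarized : List (List String)) (source : List (List String)) (synonyms : List (String × List String)), Dom_count_mathcing_tuples plagiarized source synonyms → Spec_count_mathcing_tuples plagiarized source synonyms (count_mathcing_tuples plagiarized source synonyms)

-- ===== LEMMAS AND PROOFS =====

/-- The Cartesian product of the option lists, in A's enumeration order. -/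
def prodList : List (List String) → List (List String)
  | [] => [[]]
  | o :: rest => o.flatMap (fun w => (prodList rest).map (fun t => w :: t))

theorem genSynRec_eq (ws : List (List String)) :
    ∀ (res : List (List String)) (path : List String),
      genSynRec res path ws = res ++ (prodList ws).map (fun t => path ++ t) := by
  induction ws with
  | nil => intro res path; simp [genSynRec, prodList]
  | cons o rest ih =>
    intro res path
    rw [genSynRec]
    have key : ∀ (o' : List String) (res : List (List String)),
        o'.foldl (fun r w => genSynRec r (path ++ [w]) rest) res
          = res ++ o'.flatMap (fun w => (prodList rest).map (fun t => path ++ w :: t)) := by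
      intro o'
      induction o' with
      | nil => intro res; simp
      | cons w o' ih2 =>
        intro res
        simp only [List.foldl_cons, ih]
        simp [List.append_assoc, List.flatMap]
    rw [key]
    simp [prodList, List.map_flatMap, Function.comp_def]

theorem count_flatMap (l : List String) (f : String → List (List String)) (a : List String) :
    (l.flatMap f).count a = (l.map (fun x => (f x).count a)).sum := by
  induction l with
  | nil => simp
  | cons x l ih => simp [List.flatMap_cons, List.count_append, ih]

theorem count_map_cons (w x : String) (t' : List String) (l : List (List String)) :
    (l.map (fun t => w :: t)).count (x :: t') = if w = x then l.count t' else 0 := by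
  induction l with
  | nil => simp
  | cons u l ih =>
    simp only [List.map_cons, List.count_cons, ih]
    by_cases h : w = x
    · subst h
      by_cases h2 : t' = u <;> simp [h2]
    · simp [h]

theorem sum_ite_count (o : List String) (x : String) (n : ℕ) :
    (o.map (fun w => if w = x then n else 0)).sum = o.count x * n := by
  induction o with
  | nil => simp
  | cons u o iho =>
    simp only [List.map_cons, List.sum_cons, List.count_cons, iho]
    by_cases h : u = x
    · subst h
      simp [Nat.add_mul, Nat.add_comm]
    · simp [h]

theorem count_prodList (options : List (List String)) :
    ∀ t : List String,
      (prodList options).count t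
        = if t.length = options.length
          then ((t.zip options).map (fun xo => xo.2.count xo.1)).prod else 0 := by
  induction options with
  | nil =>
    intro t
    cases t <;> simp [prodList]
  | cons o rest ih =>
    intro t
    cases t with
    | nil =>
      simp only [prodList, List.length_nil, List.length_cons]
      rw [List.count_eq_zero.mpr]
      · simp
      · intro hmem
        simp only [List.mem_flatMap, List.mem_map] at hmem
        obtain ⟨w, -, t', -, ht⟩ := hmem
        exact List.cons_ne_nil _ _ ht
    | cons x t' =>
      simp only [prodList]
      rw [count_flatMap]
      have : (o.map (fun w => ((prodList rest).map (fun t => w :: t)).count (x :: t'))).sum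
          = (o.map (fun w => if w = x then (prodList rest).count t' else 0)).sum := by
        congr 1
        apply List.map_congr_left
        intro w _
        exact count_map_cons w x t' (prodList rest)
      rw [this, sum_ite_count, ih t']
      by_cases hlen : t'.length = rest.length
      · simp [hlen, List.zip_cons_cons]
      · simp [hlen]

theorem sum_ite_mem (D : List (List String)) (g : List String) (hD : D.Nodup) :
    (D.map (fun t => if g = t then 1 else 0)).sum = if g ∈ D then 1 else 0 := by
  induction D with
  | nil => simp
  | cons d D ih =>
    simp only [List.nodup_cons] at hD
    simp only [List.map_cons, List.sum_cons, ih hD.2, List.mem_cons]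
    by_cases h : g = d
    · subst h
      simp [hD.1]
    · simp [h]

theorem sum_counts_eq_filter_len (l : List (List String)) (s D : List (List String))
    (hD : D.Nodup) (hmem : ∀ x, x ∈ D ↔ x ∈ s) :
    (D.map (fun t => l.count t)).sum = (l.filter (fun g => decide (g ∈ s))).length := by
  induction l with
  | nil => simp
  | cons g l ih =>
    have step : (D.map (fun t => (g :: l).count t)).sum
        = (D.map (fun t => l.count t)).sum + (D.map (fun t => if g = t then 1 else 0)).sum := by
      rw [← List.sum_map_add]
      congr 1
      apply List.map_congr_left
      intro t _
      simp only [List.count_cons]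
      by_cases h : t = g
      · subst h; simp
      · simp
    rw [step, ih, sum_ite_mem D g hD]
    by_cases hg : g ∈ s
    · have hgD : g ∈ D := (hmem g).mpr hg
      simp [hg, hgD]
      try omega
    · have hgD : g ∉ D := fun hc => hg ((hmem g).mp hc)
      simp [hg, hgD]

theorem foldl_membership_count (source : List (List String)) (l : List (List String)) :
    ∀ c : Int,
      l.foldl (fun c st => if st ∈ source then c + 1 else c) c
        = c + ((l.filter (fun g => decide (g ∈ source))).length : Int) := by
  induction l with
  | nil => intro c; simp
  | cons g l ih =>
    intro c
    simp only [List.foldl_cons, List.filter_cons]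
    by_cases h : g ∈ source
    · simp [h, ih]
      ring
    · simp [h, ih]

theorem foldl_add_ite (D : List (List String)) (f : List String → Int)
    (P : List String → Prop) [DecidablePred P] :
    ∀ tot : Int,
      D.foldl (fun tot t => if P t then tot + f t else tot) tot
        = tot + (D.map (fun t => if P t then f t else 0)).sum := by
  induction D with
  | nil => intro tot; simp
  | cons d D ih =>
    intro tot
    simp only [List.foldl_cons, List.map_cons, List.sum_cons, ih]
    by_cases h : P d
    · simp [h]
      ring
    · simp [h]

theorem words_eq_map (dict : PySem.Dict String (List String)) (tup : List String) :
    ∀ ws : List (List String),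
      tup.foldl (fun ws w =>
        match dict.get? w with
        | some l => ws ++ [l ++ [w]]
        | none => ws ++ [[w]]) ws
      = ws ++ tup.map (fun w =>
          match dict.get? w with
          | some l => l ++ [w]
          | none => [w]) := by
  induction tup with
  | nil => intro ws; simp
  | cons w tup ih =>
    intro ws
    simp only [List.foldl_cons, List.map_cons, ih]
    cases dict.get? w <;> simp [List.append_assoc]

theorem zipfold_eq_prod_aux (l : List (String × List String)) :
    ∀ a : ℕ, l.foldl (fun p xo => p * (xo.2.count xo.1 : Int)) (a : Int)
      = ((a * (l.map (fun xo => xo.2.count xo.1)).prod : ℕ) : Int) := by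
  induction l with
  | nil => intro a; simp
  | cons xo l ih =>
    intro a
    simp only [List.foldl_cons, List.map_cons, List.prod_cons]
    rw [show ((a : Int) * (xo.2.count xo.1 : ℕ) : Int) = ((a * xo.2.count xo.1 : ℕ) : Int) by push_cast; ring]
    rw [ih]
    push_cast
    ring_nf

theorem zipfold_eq_prod (t : List String) (options : List (List String)) :
    (t.zip options).foldl (fun p xo => p * (xo.2.count xo.1 : Int)) 1
      = (((t.zip options).map (fun xo => xo.2.count xo.1)).prod : ℕ) := by
  have := zipfold_eq_prod_aux (t.zip options) 1
  simpa using this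

/-- Per-tuple step equality: A's inner membership loop equals B's combinatorial inner loop. -/
theorem step_eq (source : List (List String)) (synonyms : List (String × List String))
    (tup : List String) (c : Int) :
    (buildSynTuples tup (PySem.Dict.mk synonyms)).foldl
        (fun c st => if st ∈ source then c + 1 else c) c
    = (PySem.List.dedup source).foldl (fun tot t =>
        if t.length = (synOptions synonyms tup).length then
          tot + (t.zip (synOptions synonyms tup)).foldl (fun p xo => p * (xo.2.count xo.1 : Int)) 1
        else tot) c := by
  set options := synOptions synonyms tup with hopt
  have hbuild : buildSynTuples tup (PySem.Dict.mk synonyms) = prodList options := by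
    unfold buildSynTuples
    rw [words_eq_map, List.nil_append, genSynRec_eq]
    simp [hopt, synOptions]
  rw [hbuild, foldl_membership_count, foldl_add_ite]
  congr 1
  have hval : ∀ t ∈ PySem.List.dedup source,
      (if t.length = options.length then
        (t.zip options).foldl (fun p xo => p * (xo.2.count xo.1 : Int)) 1
       else 0)
      = ((prodList options).count t : ℕ) := by
    intro t _
    rw [count_prodList]
    by_cases h : t.length = options.length
    · simp [h, zipfold_eq_prod]
    · simp [h]
  rw [List.map_congr_left hval]
  have hsum := sum_counts_eq_filter_len (prodList options) source (PySem.List.dedup source)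
    (PySem.List.nodup_dedup source) (fun x => PySem.List.mem_dedup source x)
  have hcast : ∀ D : List (List String),
      (D.map (fun t => (((prodList options).count t : ℕ) : Int))).sum
        = ((D.map (fun t => (prodList options).count t)).sum : ℕ) := by
    intro D
    induction D with
    | nil => simp
    | cons d D ihD => simp [ihD]
  rw [hcast, hsum]

-- ===== VERDICT (by name: the statement is the Claim_ definition above) =====
theorem count_mathcing_tuples_spec : Claim_equal_count_mathcing_tuples := by
  intro plagiarized source synonyms _
  show count_mathcing_tuples plagiarized source synonyms
      = count_mathcing_tuples_alt plagiarized source synonyms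
  unfold count_mathcing_tuples count_mathcing_tuples_alt
  simp only []
  have main : ∀ (p : List (List String)) (c : Int),
      p.foldl (fun c tup =>
        (buildSynTuples tup (PySem.Dict.mk synonyms)).foldl
          (fun c st => if st ∈ source then c + 1 else c) c) c
      = p.foldl (fun total tup =>
          (PySem.List.dedup source).foldl (fun tot t =>
            if t.length = (synOptions synonyms tup).length then
              tot + (t.zip (synOptions synonyms tup)).foldl
                (fun p xo => p * (xo.2.count xo.1 : Int)) 1
            else tot) total) c := by
    intro p
    induction p with
    | nil => intro c; rfl
    | cons tup rest ih =>
      intro c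
      simp only [List.foldl_cons]
      rw [step_eq, ih]
  exact main plagiarized 0
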